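-- pv_equiv track=rewrite | github.com/Zarthen/Kolko_i_krzyzyk | serwer.py | policz_punkty
-- ===== SOURCE A (Python) =====
-- def policz_punkty(plansza, symbol):
--     punkty = {2: 1, 3: 3, 4: 7, 5: 15}
--     wynik = 0
--
--     def licz_grupy(linia):
--         suma = 0
--         cnt = 0
--         for v in linia:
--             if v == symbol:
--                 cnt += 1
--             else:
--                 if cnt in punkty:
--                     suma += punkty[cnt]
--                 cnt = 0
--         if cnt in punkty:
--             suma += punkty[cnt]
--         return suma
--
--     N = len(plansza)
--     # Wiersze
--     for i in range(N):
--         wynik += licz_grupy(plansza[i])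
--     # Kolumny
--     for j in range(N):
--         wynik += licz_grupy([plansza[i][j] for i in range(N)])
--     # Wszystkie przekątne ↘ (z lewej do prawej)
--     for k in range(-N+2, N-1):
--         przekatna = [plansza[i][i-k] for i in range(max(k, 0), min(N, N+k))]
--         if len(przekatna) >= 2:
--             wynik += licz_grupy(przekatna)
--     # Wszystkie przekątne ↗ (z lewej do prawej w dół)
--     for k in range(1, 2*N-2):
--         przekatna = [plansza[i][k-i] for i in range(max(0, k-N+1), min(N, k+1)) if 0 <= k-i < N]
--         if len(przekatna) >= 2:
--             wynik += licz_grupy(przekatna)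
--     return wynik
-- ===== SOURCE B (Python) =====
-- def policz_punkty(plansza, symbol):
--     punkty = {2: 1, 3: 3, 4: 7, 5: 15}
--
--     def licz_grupy(linia):
--         suma = 0
--         cnt = 0
--         for v in linia:
--             if v == symbol:
--                 cnt += 1
--             else:
--                 if cnt in punkty:
--                     suma += punkty[cnt]
--                 cnt = 0
--         if cnt in punkty:
--             suma += punkty[cnt]
--         return suma
--
--     n = len(plansza)
--     cols = [[] for _ in range(n)]
--     diags = [[] for _ in range(2 * n - 1)]
--     antis = [[] for _ in range(2 * n - 1)]
--     wynik = 0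
--     # one pass over the board: score each row and bucket every cell into its
--     # column, main-diagonal (i - j, shifted) and anti-diagonal (i + j) line
--     for i, row in enumerate(plansza):
--         wynik += licz_grupy(row)
--         for j in range(n):
--             v = row[j]
--             cols[j].append(v)
--             diags[i + (n - 1 - j)].append(v)
--             antis[i + j].append(v)
--     for linia in cols:
--         wynik += licz_grupy(linia)
--     for linia in diags:
--         wynik += licz_grupy(linia)
--     for linia in antis:
--         wynik += licz_grupy(linia)
--     return wynik
-- ===== Notes on version B (the rewrite author's own statement) =====
-- stated objective: alternative
-- what changed: B replaces A's four separate line-extraction passes (row list, per-column comprehension, per-diagonal comprehension with index arithmetic over k) by a single row-major pass that buckets every cell into column / diagonal (i-j) / anti-diagonal (i+j) line tables, then runs the shared run-counting helper over the bucketed lines.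
import Mathlib
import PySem

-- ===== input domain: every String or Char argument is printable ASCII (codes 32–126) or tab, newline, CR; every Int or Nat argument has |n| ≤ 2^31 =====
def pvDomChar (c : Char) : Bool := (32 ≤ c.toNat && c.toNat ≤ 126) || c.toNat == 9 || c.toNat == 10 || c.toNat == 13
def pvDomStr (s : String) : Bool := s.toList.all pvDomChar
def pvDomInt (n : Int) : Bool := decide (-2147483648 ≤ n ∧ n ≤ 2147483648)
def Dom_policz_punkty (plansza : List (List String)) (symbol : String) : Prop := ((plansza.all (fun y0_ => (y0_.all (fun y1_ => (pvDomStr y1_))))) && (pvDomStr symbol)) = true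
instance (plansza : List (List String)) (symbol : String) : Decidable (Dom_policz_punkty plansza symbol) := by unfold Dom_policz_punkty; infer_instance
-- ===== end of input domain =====

-- B re-implements the scoring with ONE pass over the board that buckets every cell
-- into its column / diagonal / anti-diagonal line, instead of A's four separate
-- extraction passes (objective: alternative decomposition, same asymptotic cost).

-- ===== PORT A =====

-- punkty = {2: 1, 3: 3, 4: 7, 5: 15}
def pvPunkty : PySem.Dict Int Int := PySem.Dict.ofList [(2, 1), (3, 3), (4, 7), (5, 15)]

-- licz_grupy (identical helper text in A and in B, so it is shared by both ports)
def pvLicz (symbol : String) (linia : List String) : Int :=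
  let st := linia.foldl (fun (s : Int × Int) v =>
    if v = symbol then (s.1, s.2 + 1)
    else match PySem.Dict.get? pvPunkty s.2 with
      | some p => (s.1 + p, 0)
      | none   => (s.1, 0)) (0, 0)
  match PySem.Dict.get? pvPunkty st.2 with
  | some p => st.1 + p
  | none   => st.1

def policz_punkty (plansza : List (List String)) (symbol : String) : Int :=
  let N : Int := plansza.length
  -- Wiersze
  let wynik1 := (PySem.List.pyRange 0 N).foldl
    (fun w i => w + pvLicz symbol (PySem.List.pyGetD plansza i [])) 0
  -- Kolumny
  let wynik2 := (PySem.List.pyRange 0 N).foldl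
    (fun w j => w + pvLicz symbol
      ((PySem.List.pyRange 0 N).map
        (fun i => PySem.List.pyGetD (PySem.List.pyGetD plansza i []) j ""))) wynik1
  -- Przekątne ↘
  let wynik3 := (PySem.List.pyRange (-N + 2) (N - 1)).foldl
    (fun w k =>
      let przekatna := (PySem.List.pyRange (max k 0) (min N (N + k))).map
        (fun i => PySem.List.pyGetD (PySem.List.pyGetD plansza i []) (i - k) "")
      if 2 ≤ przekatna.length then w + pvLicz symbol przekatna else w) wynik2
  -- Przekątne ↗
  let wynik4 := (PySem.List.pyRange 1 (2 * N - 2)).foldl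
    (fun w k =>
      let przekatna := ((PySem.List.pyRange (max 0 (k - N + 1)) (min N (k + 1))).filter
        (fun i => decide (0 ≤ k - i ∧ k - i < N))).map
        (fun i => PySem.List.pyGetD (PySem.List.pyGetD plansza i []) (k - i) "")
      if 2 ≤ przekatna.length then w + pvLicz symbol przekatna else w) wynik3
  wynik4

-- ===== PORT B =====

-- bucket.append: list index k is nonnegative at every call site (i ≥ 0, 0 ≤ j < n)
def pvBput (t : List (List String)) (k : Int) (v : String) : List (List String) :=
  t.set k.toNat (t.getD k.toNat [] ++ [v])

def policz_punkty_alt (plansza : List (List String)) (symbol : String) : Int :=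
  let n := plansza.length
  let cols : List (List String) := List.replicate n []
  let diags : List (List String) := List.replicate (2 * n - 1) []
  let antis : List (List String) := List.replicate (2 * n - 1) []
  -- one pass: score each row and bucket every cell into its three other lines
  let st :=
    (PySem.List.enumerate plansza).foldl
      (fun (st : Int × List (List String) × List (List String) × List (List String)) p =>
        (PySem.List.pyRange 0 (n : Int)).foldl
          (fun st2 j =>
            let v := PySem.List.pyGetD p.2 j ""
            (st2.1, pvBput st2.2.1 j v,
             pvBput st2.2.2.1 (p.1 + ((n : Int) - 1 - j)) v,
             pvBput st2.2.2.2 (p.1 + j) v))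
          (st.1 + pvLicz symbol p.2, st.2))
      (0, cols, diags, antis)
  let w1 := st.2.1.foldl (fun w l => w + pvLicz symbol l) st.1
  let w2 := st.2.2.1.foldl (fun w l => w + pvLicz symbol l) w1
  st.2.2.2.foldl (fun w l => w + pvLicz symbol l) w2

-- ===== PRECONDITION & SPEC =====
-- Pre_ excludes exactly the boards having a row shorter than the number of rows:
-- there Python A raises IndexError (in the column pass), and Python B raises too.
def Pre_policz_punkty (plansza : List (List String)) (symbol : String) : Prop :=
  ∀ row ∈ plansza, plansza.length ≤ row.length

instance (plansza : List (List String)) (symbol : String) : Decidable (Pre_policz_punkty plansza symbol) := by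
  unfold Pre_policz_punkty; infer_instance

def pvWitness_policz_punkty : List (List String) × String := ([["x", "x"], ["o", "x"]], "x")

def Spec_policz_punkty (plansza : List (List String)) (symbol : String) (out : Int) : Prop := out = policz_punkty_alt plansza symbol
instance (plansza : List (List String)) (symbol : String) (out : Int) : Decidable (Spec_policz_punkty plansza symbol out) := by unfold Spec_policz_punkty; infer_instance

-- ===== CLAIM (what is proved, stated in full; the proofs are below) =====
def Claim_equal_policz_punkty : Prop := ∀ (plansza : List (List String)) (symbol : String), Dom_policz_punkty plansza symbol → Pre_policz_punkty plansza symbol → Spec_policz_punkty plansza symbol (policz_punkty plansza symbol)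

-- ===== LEMMAS AND PROOFS =====

-- the board cell plansza[i][j], totalised with defaults (both ports read cells this way)
def pvCell (P : List (List String)) (i j : Int) : String :=
  PySem.List.pyGetD (PySem.List.pyGetD P i []) j ""

-- a run of length ≤ 1 scores nothing
lemma pvLicz_singleton (symbol : String) (v : String) : pvLicz symbol [v] = 0 := by
  by_cases h : v = symbol <;> simp [pvLicz, h] <;> rfl

lemma pvFoldl_const {β : Type} (l : List β) (w : Int) :
    l.foldl (fun x _ => x) w = w := by
  induction l <;> simp_all

lemma pvFoldl_prod4 {β : Type} (l : List β) (h0 : Int → β → Int)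
    (g1 g2 g3 : List (List String) → β → List (List String))
    (w : Int) (c d a : List (List String)) :
    l.foldl (fun st p => (h0 st.1 p, g1 st.2.1 p, g2 st.2.2.1 p, g3 st.2.2.2 p)) (w, c, d, a)
      = (l.foldl h0 w, l.foldl g1 c, l.foldl g2 d, l.foldl g3 a) := by
  induction l generalizing w c d a with
  | nil => rfl
  | cons x xs ih => simp [List.foldl_cons, ih]

lemma pvBput_length (t : List (List String)) (k : Int) (v : String) :
    (pvBput t k v).length = t.length := by
  simp [pvBput]

lemma pvFoldl_bput_length {β : Type} (l : List β) (key : β → Int) (val : β → String)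
    (t : List (List String)) :
    (l.foldl (fun t q => pvBput t (key q) (val q)) t).length = t.length := by
  induction l generalizing t with
  | nil => rfl
  | cons x xs ih => simp [List.foldl_cons, ih, pvBput_length]

lemma pvFoldl_bput_getD {β : Type} (l : List β) (key : β → Int) (val : β → String)
    (t : List (List String)) (m : Nat) (hm : m < t.length) (hk : ∀ q ∈ l, 0 ≤ key q) :
    (l.foldl (fun t q => pvBput t (key q) (val q)) t).getD m []
      = t.getD m [] ++ (l.filter (fun q => key q == (m : Int))).map val := by
  induction l generalizing t with
  | nil => simp
  | cons x xs ih =>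
      have hx : 0 ≤ key x := hk x (List.mem_cons_self)
      have hlen : (pvBput t (key x) (val x)).length = t.length := pvBput_length ..
      rw [List.foldl_cons, ih _ (by omega) (fun q hq => hk q (List.mem_cons_of_mem _ hq))]
      by_cases h : key x = (m : Int)
      · have htn : (key x).toNat = m := by omega
        have hset : (pvBput t (key x) (val x)).getD m [] = t.getD m [] ++ [val x] := by
          simp [pvBput, htn, List.getD_eq_getElem?_getD, List.getElem?_set, hm]
        rw [hset, List.filter_cons]
        simp [h]
      · have htn : (key x).toNat ≠ m := by omega
        have hset : (pvBput t (key x) (val x)).getD m [] = t.getD m [] := by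
          simp [pvBput, List.getD_eq_getElem?_getD, htn]
        have hb : (key x == (m : Int)) = false := by simp [h]
        rw [hset, List.filter_cons, hb]
        simp

lemma pvFlatMap_if_singleton {β γ : Type} (l : List β) (P : β → Prop) [DecidablePred P]
    (f : β → γ) :
    l.flatMap (fun x => if P x then [f x] else [])
      = (l.filter (fun x => decide (P x))).map f := by
  induction l with
  | nil => rfl
  | cons x xs ih =>
      by_cases h : P x <;> simp [List.flatMap_cons, h, ih]

lemma pvPyRange_filter_interval (a b lo hi : Int) (P : Int → Prop) [DecidablePred P]
    (hP : ∀ i, P i ↔ (lo ≤ i ∧ i < hi)) :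
    (PySem.List.pyRange a b).filter (fun i => decide (P i))
      = PySem.List.pyRange (max lo a) (min hi b) := by
  by_cases hab : min hi b ≤ max lo a
  · rw [PySem.List.pyRange_one_eq_nil hab, List.filter_eq_nil_iff]
    intro i hi'
    have := PySem.List.mem_pyRange_one.mp hi'
    simp only [decide_eq_true_eq]
    rw [hP]; omega
  · have h1 : a ≤ max lo a := le_max_right _ _
    have h2 : max lo a ≤ min hi b := by omega
    have h3 : min hi b ≤ b := min_le_right _ _
    rw [PySem.List.pyRange_one_append a (max lo a) b h1 (by omega),
        PySem.List.pyRange_one_append (max lo a) (min hi b) b h2 h3,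
        List.filter_append, List.filter_append]
    have e1 : (PySem.List.pyRange a (max lo a)).filter (fun i => decide (P i)) = [] := by
      rw [List.filter_eq_nil_iff]
      intro i hi'
      have := PySem.List.mem_pyRange_one.mp hi'
      simp only [decide_eq_true_eq]; rw [hP]; omega
    have e2 : (PySem.List.pyRange (max lo a) (min hi b)).filter (fun i => decide (P i))
        = PySem.List.pyRange (max lo a) (min hi b) := by
      rw [List.filter_eq_self]
      intro i hi'
      have := PySem.List.mem_pyRange_one.mp hi'
      simp only [decide_eq_true_eq]; rw [hP]; omega
    have e3 : (PySem.List.pyRange (min hi b) b).filter (fun i => decide (P i)) = [] := by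
      rw [List.filter_eq_nil_iff]
      intro i hi'
      have := PySem.List.mem_pyRange_one.mp hi'
      simp only [decide_eq_true_eq]; rw [hP]; omega
    rw [e1, e2, e3, List.nil_append, List.append_nil]

lemma pvPyRange_flatMap_ite {γ : Type} (a b lo hi : Int) (P : Int → Prop) [DecidablePred P]
    (f : Int → γ) (hP : ∀ i, P i ↔ (lo ≤ i ∧ i < hi)) :
    (PySem.List.pyRange a b).flatMap (fun i => if P i then [f i] else [])
      = (PySem.List.pyRange (max lo a) (min hi b)).map f := by
  rw [pvFlatMap_if_singleton, pvPyRange_filter_interval a b lo hi P hP]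

lemma pvList_eq_map_range_getD (t : List (List String)) :
    t = (List.range t.length).map (fun m => t.getD m []) := by
  apply List.ext_getElem (by simp)
  intro i h1 h2
  simp [List.getD_eq_getElem?_getD, List.getElem?_eq_getElem h1]


-- the flattened cell stream of B's single pass, and a bucket table built from it
def pvCells (P : List (List String)) : List ((Int × List String) × Int) :=
  (PySem.List.enumerate P).flatMap
    (fun p => (PySem.List.pyRange 0 (P.length : Int)).map (fun j => (p, j)))

def pvTab (P : List (List String)) (key : (Int × List String) × Int → Int) (L : Nat) :
    List (List String) :=
  (pvCells P).foldl (fun t q => pvBput t (key q) (PySem.List.pyGetD q.1.2 q.2 ""))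
    (List.replicate L [])

-- B's interleaved fold splits into four independent folds
lemma pvAlt_fold (symbol : String) (n : Int) (l : List (Int × List String))
    (w : Int) (c d a : List (List String)) :
    l.foldl
      (fun (st : Int × List (List String) × List (List String) × List (List String)) p =>
        (PySem.List.pyRange 0 n).foldl
          (fun st2 j =>
            (st2.1, pvBput st2.2.1 j (PySem.List.pyGetD p.2 j ""),
             pvBput st2.2.2.1 (p.1 + (n - 1 - j)) (PySem.List.pyGetD p.2 j ""),
             pvBput st2.2.2.2 (p.1 + j) (PySem.List.pyGetD p.2 j "")))
          (st.1 + pvLicz symbol p.2, st.2))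
      (w, c, d, a)
    = (l.foldl (fun w p => w + pvLicz symbol p.2) w,
       l.foldl (fun c p => (PySem.List.pyRange 0 n).foldl
         (fun c j => pvBput c j (PySem.List.pyGetD p.2 j "")) c) c,
       l.foldl (fun d p => (PySem.List.pyRange 0 n).foldl
         (fun d j => pvBput d (p.1 + (n - 1 - j)) (PySem.List.pyGetD p.2 j "")) d) d,
       l.foldl (fun a p => (PySem.List.pyRange 0 n).foldl
         (fun a j => pvBput a (p.1 + j) (PySem.List.pyGetD p.2 j "")) a) a) := by
  induction l generalizing w c d a with
  | nil => rfl
  | cons p l ih =>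
      simp only [List.foldl_cons]
      rw [pvFoldl_prod4 (PySem.List.pyRange 0 n) (fun x _ => x)
        (fun c j => pvBput c j (PySem.List.pyGetD p.2 j ""))
        (fun d j => pvBput d (p.1 + (n - 1 - j)) (PySem.List.pyGetD p.2 j ""))
        (fun a j => pvBput a (p.1 + j) (PySem.List.pyGetD p.2 j ""))
        (w + pvLicz symbol p.2) c d a, pvFoldl_const]
      exact ih _ _ _ _

-- a nested per-row bucket loop is the bucket loop over the flattened cell stream
lemma pvNestedC (l : List (Int × List String)) (r : List Int) (t : List (List String)) :
    l.foldl (fun t p => r.foldl (fun t j => pvBput t j (PySem.List.pyGetD p.2 j "")) t) t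
      = (l.flatMap (fun p => r.map (fun j => (p, j)))).foldl
          (fun t q => pvBput t q.2 (PySem.List.pyGetD q.1.2 q.2 "")) t := by
  induction l generalizing t with
  | nil => rfl
  | cons p l ih =>
      simp only [List.foldl_cons, List.flatMap_cons, List.foldl_append, List.foldl_map]
      rw [ih]

lemma pvNestedD (n : Int) (l : List (Int × List String)) (r : List Int) (t : List (List String)) :
    l.foldl (fun t p => r.foldl (fun t j => pvBput t (p.1 + (n - 1 - j)) (PySem.List.pyGetD p.2 j "")) t) t
      = (l.flatMap (fun p => r.map (fun j => (p, j)))).foldl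
          (fun t q => pvBput t (q.1.1 + (n - 1 - q.2)) (PySem.List.pyGetD q.1.2 q.2 "")) t := by
  induction l generalizing t with
  | nil => rfl
  | cons p l ih =>
      simp only [List.foldl_cons, List.flatMap_cons, List.foldl_append, List.foldl_map]
      rw [ih]

lemma pvNestedA (l : List (Int × List String)) (r : List Int) (t : List (List String)) :
    l.foldl (fun t p => r.foldl (fun t j => pvBput t (p.1 + j) (PySem.List.pyGetD p.2 j "")) t) t
      = (l.flatMap (fun p => r.map (fun j => (p, j)))).foldl
          (fun t q => pvBput t (q.1.1 + q.2) (PySem.List.pyGetD q.1.2 q.2 "")) t := by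
  induction l generalizing t with
  | nil => rfl
  | cons p l ih =>
      simp only [List.foldl_cons, List.flatMap_cons, List.foldl_append, List.foldl_map]
      rw [ih]

-- evaluation of port B: row score plus one bucket table per line family
lemma pvAlt_eq (P : List (List String)) (symbol : String) :
    policz_punkty_alt P symbol =
      (((0 + (P.map (pvLicz symbol)).sum)
        + ((pvTab P (fun q => q.2) P.length).map (pvLicz symbol)).sum)
        + ((pvTab P (fun q => q.1.1 + ((P.length : Int) - 1 - q.2)) (2 * P.length - 1)).map
            (pvLicz symbol)).sum)
        + ((pvTab P (fun q => q.1.1 + q.2) (2 * P.length - 1)).map (pvLicz symbol)).sum := by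
  simp only [policz_punkty_alt]
  rw [pvAlt_fold]
  simp only [pvTab, pvCells]
  rw [pvNestedC, pvNestedD, pvNestedA,
    ← List.foldl_map (f := fun (x : Int × List String) => x.2)
      (g := fun w r => w + pvLicz symbol r),
    PySem.List.map_snd_enumerate,
    PySem.List.foldl_add P (pvLicz symbol) 0,
    PySem.List.foldl_add _ (pvLicz symbol) _,
    PySem.List.foldl_add _ (pvLicz symbol) _,
    PySem.List.foldl_add _ (pvLicz symbol) _]

-- A's diagonal and anti-diagonal line extractions
def pvDlineA (P : List (List String)) (k : Int) : List String :=
  (PySem.List.pyRange (max k 0) (min (P.length : Int) ((P.length : Int) + k))).map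
    (fun i => pvCell P i (i - k))

def pvAlineA (P : List (List String)) (k : Int) : List String :=
  ((PySem.List.pyRange (max 0 (k - (P.length : Int) + 1)) (min (P.length : Int) (k + 1))).filter
    (fun i => decide (0 ≤ k - i ∧ k - i < (P.length : Int)))).map (fun i => pvCell P i (k - i))

-- evaluation of port A: four separate sums
lemma pvA_eq (P : List (List String)) (symbol : String) :
    policz_punkty P symbol =
      (((0 + (P.map (pvLicz symbol)).sum)
        + ((PySem.List.pyRange 0 (P.length : Int)).map
            (fun j => pvLicz symbol
              ((PySem.List.pyRange 0 (P.length : Int)).map (fun i => pvCell P i j)))).sum)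
        + ((PySem.List.pyRange (-(P.length : Int) + 2) ((P.length : Int) - 1)).map
            (fun k => if 2 ≤ (pvDlineA P k).length then pvLicz symbol (pvDlineA P k) else 0)).sum)
        + ((PySem.List.pyRange 1 (2 * (P.length : Int) - 2)).map
            (fun k => if 2 ≤ (pvAlineA P k).length then pvLicz symbol (pvAlineA P k) else 0)).sum := by
  have hite : ∀ (c : Prop) [Decidable c] (w x : Int), (if c then w + x else w) = w + (if c then x else 0) := by
    intro c _ w x; split <;> simp
  simp only [policz_punkty, pvDlineA, pvAlineA, pvCell]
  rw [PySem.List.foldl_pyRange_zero_pyGetD' P [] (fun w r => w + pvLicz symbol r) 0,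
    PySem.List.foldl_add P (pvLicz symbol) 0,
    PySem.List.foldl_add _ (fun j => pvLicz symbol
      ((PySem.List.pyRange 0 (P.length : Int)).map
        (fun i => PySem.List.pyGetD (PySem.List.pyGetD P i []) j ""))) _]
  simp only [hite]
  rw [PySem.List.foldl_add _ (fun k => if 2 ≤ ((PySem.List.pyRange (max k 0) (min (P.length : Int) ((P.length : Int) + k))).map
        (fun i => PySem.List.pyGetD (PySem.List.pyGetD P i []) (i - k) "")).length
        then pvLicz symbol ((PySem.List.pyRange (max k 0) (min (P.length : Int) ((P.length : Int) + k))).map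
        (fun i => PySem.List.pyGetD (PySem.List.pyGetD P i []) (i - k) "")) else 0) _,
    PySem.List.foldl_add _ (fun k => if 2 ≤ (((PySem.List.pyRange (max 0 (k - (P.length : Int) + 1)) (min (P.length : Int) (k + 1))).filter
        (fun i => decide (0 ≤ k - i ∧ k - i < (P.length : Int)))).map
        (fun i => PySem.List.pyGetD (PySem.List.pyGetD P i []) (k - i) "")).length
        then pvLicz symbol (((PySem.List.pyRange (max 0 (k - (P.length : Int) + 1)) (min (P.length : Int) (k + 1))).filter
        (fun i => decide (0 ≤ k - i ∧ k - i < (P.length : Int)))).map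
        (fun i => PySem.List.pyGetD (PySem.List.pyGetD P i []) (k - i) "")) else 0) _]

-- cells carry nonnegative indices
lemma pvMem_cells {P : List (List String)} {q : (Int × List String) × Int}
    (hq : q ∈ pvCells P) : 0 ≤ q.1.1 ∧ 0 ≤ q.2 ∧ q.2 < (P.length : Int) := by
  simp only [pvCells, List.mem_flatMap] at hq
  obtain ⟨p, hp, hq⟩ := hq
  simp only [List.mem_map] at hq
  obtain ⟨j, hj, rfl⟩ := hq
  have hj' := PySem.List.mem_pyRange_one.mp hj
  obtain ⟨k, hk, rfl⟩ := (PySem.List.mem_enumerate_iff P 0 p).mp hp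
  simp
  omega

-- a bucket table entry, as the filtered cell stream
lemma pvTab_getD_flat (P : List (List String)) (key : (Int × List String) × Int → Int)
    (L : Nat) (m : Nat) (hm : m < L) (hk : ∀ q ∈ pvCells P, 0 ≤ key q) :
    (pvTab P key L).getD m []
      = (PySem.List.pyRange 0 (P.length : Int)).flatMap
          (fun i => ((PySem.List.pyRange 0 (P.length : Int)).filter
              (fun j => key ((i, PySem.List.pyGetD P i []), j) == (m : Int))).map
            (fun j => pvCell P i j)) := by
  unfold pvTab
  rw [pvFoldl_bput_getD _ key _ _ m (by simp [hm]) hk]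
  have hrep : (List.replicate L ([] : List String)).getD m [] = [] := by
    simp [List.getD_eq_getElem?_getD, hm]
  rw [hrep, List.nil_append]
  rw [pvCells, PySem.List.enumerate_eq_map_pyRange P [], List.flatMap_map,
    List.filter_flatMap, List.map_flatMap]
  have hlen : PySem.List.len P = (P.length : Int) := by simp [PySem.List.len]
  rw [hlen]
  have hfun : (fun (a : Int) =>
      List.map (fun (q : (Int × List String) × Int) => PySem.List.pyGetD q.1.2 q.2 "")
        (List.filter (fun q => key q == (m : Int))
          (List.map (fun j => ((a, PySem.List.pyGetD P a []), j)) (PySem.List.pyRange 0 (P.length : Int)))))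
      = (fun i =>
        List.map (fun j => pvCell P i j)
          (List.filter (fun j => key ((i, PySem.List.pyGetD P i []), j) == (m : Int))
            (PySem.List.pyRange 0 (P.length : Int)))) := by
    funext i
    rw [List.filter_map, List.map_map]
    simp only [Function.comp_def, pvCell]
  rw [hfun]

lemma pvFlatMap_single {β γ : Type} (l : List β) (f : β → γ) :
    l.flatMap (fun x => [f x]) = l.map f := by
  induction l <;> simp_all

-- B's bucket lines, written as index ranges
def pvDLine (P : List (List String)) (m : Int) : List String :=
  (PySem.List.pyRange (max (m - (P.length : Int) + 1) 0) (min (m + 1) (P.length : Int))).map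
    (fun i => pvCell P i (i + ((P.length : Int) - 1 - m)))

def pvALine (P : List (List String)) (m : Int) : List String :=
  (PySem.List.pyRange (max (m - (P.length : Int) + 1) 0) (min (m + 1) (P.length : Int))).map
    (fun i => pvCell P i (m - i))

lemma pvCol_getD (P : List (List String)) (m : Nat) (hm : m < P.length) :
    (pvTab P (fun q => q.2) P.length).getD m []
      = P.map (fun row => PySem.List.pyGetD row (m : Int) "") := by
  rw [pvTab_getD_flat P _ _ m hm (fun q hq => (pvMem_cells hq).2.1)]
  have hfun : (fun (i : Int) =>
      ((PySem.List.pyRange 0 (P.length : Int)).filter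
        (fun j => (((i, PySem.List.pyGetD P i []), j).2 == (m : Int)))).map
        (fun j => pvCell P i j))
      = (fun i => [pvCell P i (m : Int)]) := by
    funext i
    rw [List.filter_congr (q := fun j => decide ((m : Int) ≤ j ∧ j < (m : Int) + 1))
      (by intro j hj; rw [Bool.eq_iff_iff]; simp only [beq_iff_eq, decide_eq_true_eq]; omega),
      pvPyRange_filter_interval 0 (P.length : Int) (m : Int) ((m : Int) + 1) _ (fun _ => Iff.rfl),
      show max (m : Int) 0 = (m : Int) by omega,
      show min ((m : Int) + 1) (P.length : Int) = (m : Int) + 1 by omega,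
      PySem.List.pyRange_one_singleton]
    rfl
  rw [hfun, pvFlatMap_single]
  rw [show (fun i => pvCell P i (m : Int))
      = ((fun row => PySem.List.pyGetD row (m : Int) "") ∘ (fun i => PySem.List.pyGetD P i [])) from rfl,
    ← List.map_map, PySem.List.map_pyGetD_pyRange_zero']

lemma pvDiag_getD (P : List (List String)) (m : Nat) (hm : m < 2 * P.length - 1) :
    (pvTab P (fun q => q.1.1 + ((P.length : Int) - 1 - q.2)) (2 * P.length - 1)).getD m []
      = pvDLine P (m : Int) := by
  rw [pvTab_getD_flat P _ _ m hm (fun q hq => by have := pvMem_cells hq; omega)]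
  have hfun : (fun (i : Int) =>
      ((PySem.List.pyRange 0 (P.length : Int)).filter
        (fun j => (((i, PySem.List.pyGetD P i []), j).1.1
            + ((P.length : Int) - 1 - ((i, PySem.List.pyGetD P i []), j).2) == (m : Int)))).map
        (fun j => pvCell P i j))
      = (fun i => if 0 ≤ i + ((P.length : Int) - 1 - (m : Int))
            ∧ i + ((P.length : Int) - 1 - (m : Int)) < (P.length : Int)
          then [pvCell P i (i + ((P.length : Int) - 1 - (m : Int)))] else []) := by
    funext i
    rw [List.filter_congr (q := fun j => decide (i + ((P.length : Int) - 1 - (m : Int)) ≤ j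
        ∧ j < i + ((P.length : Int) - 1 - (m : Int)) + 1))
      (by intro j hj; rw [Bool.eq_iff_iff]; simp only [beq_iff_eq, decide_eq_true_eq]; omega),
      pvPyRange_filter_interval 0 (P.length : Int) _ _ _ (fun _ => Iff.rfl)]
    split_ifs with h
    · rw [show max (i + ((P.length : Int) - 1 - (m : Int))) 0 = i + ((P.length : Int) - 1 - (m : Int)) by omega,
        show min (i + ((P.length : Int) - 1 - (m : Int)) + 1) (P.length : Int)
            = i + ((P.length : Int) - 1 - (m : Int)) + 1 by omega,
        PySem.List.pyRange_one_singleton]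
      rfl
    · rw [PySem.List.pyRange_one_eq_nil (by omega)]
      rfl
  rw [hfun, pvPyRange_flatMap_ite 0 (P.length : Int) ((m : Int) - (P.length : Int) + 1)
    ((m : Int) + 1) _ _ (by intro i; constructor <;> intro h <;> omega)]
  rfl

lemma pvAnti_getD (P : List (List String)) (m : Nat) (hm : m < 2 * P.length - 1) :
    (pvTab P (fun q => q.1.1 + q.2) (2 * P.length - 1)).getD m []
      = pvALine P (m : Int) := by
  rw [pvTab_getD_flat P _ _ m hm (fun q hq => by have := pvMem_cells hq; omega)]
  have hfun : (fun (i : Int) =>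
      ((PySem.List.pyRange 0 (P.length : Int)).filter
        (fun j => (((i, PySem.List.pyGetD P i []), j).1.1
            + ((i, PySem.List.pyGetD P i []), j).2 == (m : Int)))).map
        (fun j => pvCell P i j))
      = (fun i => if 0 ≤ (m : Int) - i ∧ (m : Int) - i < (P.length : Int)
          then [pvCell P i ((m : Int) - i)] else []) := by
    funext i
    rw [List.filter_congr (q := fun j => decide ((m : Int) - i ≤ j ∧ j < (m : Int) - i + 1))
      (by intro j hj; rw [Bool.eq_iff_iff]; simp only [beq_iff_eq, decide_eq_true_eq]; omega),
      pvPyRange_filter_interval 0 (P.length : Int) _ _ _ (fun _ => Iff.rfl)]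
    split_ifs with h
    · rw [show max ((m : Int) - i) 0 = (m : Int) - i by omega,
        show min ((m : Int) - i + 1) (P.length : Int) = (m : Int) - i + 1 by omega,
        PySem.List.pyRange_one_singleton]
      rfl
    · rw [PySem.List.pyRange_one_eq_nil (by omega)]
      rfl
  rw [hfun, pvPyRange_flatMap_ite 0 (P.length : Int) ((m : Int) - (P.length : Int) + 1)
    ((m : Int) + 1) _ _ (by intro i; constructor <;> intro h <;> omega)]
  rfl

lemma pvTab_length (P : List (List String)) (key : (Int × List String) × Int → Int) (L : Nat) :
    (pvTab P key L).length = L := by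
  unfold pvTab
  rw [pvFoldl_bput_length]
  simp

lemma pvTab_map_eq (P : List (List String)) (key : (Int × List String) × Int → Int)
    (L : Nat) (symbol : String) :
    ((pvTab P key L).map (pvLicz symbol)).sum
      = ((List.range L).map (fun m => pvLicz symbol ((pvTab P key L).getD m []))).sum := by
  conv_lhs => rw [pvList_eq_map_range_getD (pvTab P key L)]
  rw [List.map_map, pvTab_length]
  simp only [Function.comp_def]

-- a list whose every entry has length ≤ 1 scores nothing: helper for degenerate lines
lemma pvLicz_pyRange_single (symbol : String) (a : Int) (f : Int → String) :
    pvLicz symbol ((PySem.List.pyRange a (a + 1)).map f) = 0 := by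
  rw [PySem.List.pyRange_one_singleton, List.map_cons, List.map_nil]
  exact pvLicz_singleton symbol (f a)

lemma pvDLine_deg (P : List (List String)) (symbol : String) (m : Int) (hn : 1 ≤ P.length)
    (hm : m = 0 ∨ m = 2 * (P.length : Int) - 2) : pvLicz symbol (pvDLine P m) = 0 := by
  rcases hm with hm | hm
  · rw [pvDLine, hm, show max ((0 : Int) - (P.length : Int) + 1) 0 = 0 by omega,
      show min ((0 : Int) + 1) (P.length : Int) = 0 + 1 by omega]
    exact pvLicz_pyRange_single ..
  · rw [pvDLine, hm,
      show max (2 * (P.length : Int) - 2 - (P.length : Int) + 1) 0 = (P.length : Int) - 1 by omega,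
      show min (2 * (P.length : Int) - 2 + 1) (P.length : Int) = ((P.length : Int) - 1) + 1 by omega]
    exact pvLicz_pyRange_single ..

lemma pvALine_deg (P : List (List String)) (symbol : String) (m : Int) (hn : 1 ≤ P.length)
    (hm : m = 0 ∨ m = 2 * (P.length : Int) - 2) : pvLicz symbol (pvALine P m) = 0 := by
  rcases hm with hm | hm
  · rw [pvALine, hm, show max ((0 : Int) - (P.length : Int) + 1) 0 = 0 by omega,
      show min ((0 : Int) + 1) (P.length : Int) = 0 + 1 by omega]
    exact pvLicz_pyRange_single ..
  · rw [pvALine, hm,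
      show max (2 * (P.length : Int) - 2 - (P.length : Int) + 1) 0 = (P.length : Int) - 1 by omega,
      show min (2 * (P.length : Int) - 2 + 1) (P.length : Int) = ((P.length : Int) - 1) + 1 by omega]
    exact pvLicz_pyRange_single ..

-- A's ↘ extraction is a bucket line, reindexed
lemma pvDlineA_eq (P : List (List String)) (k : Int) :
    pvDlineA P k = pvDLine P (k + (P.length : Int) - 1) := by
  rw [pvDlineA, pvDLine,
    show max (k + (P.length : Int) - 1 - (P.length : Int) + 1) 0 = max k 0 by omega,
    show min (k + (P.length : Int) - 1 + 1) (P.length : Int)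
        = min (P.length : Int) ((P.length : Int) + k) by omega]
  apply List.map_congr_left
  intro i _
  rw [show i + ((P.length : Int) - 1 - (k + (P.length : Int) - 1)) = i - k by ring]

-- A's ↗ extraction: the comprehension's guard is redundant, the line is the bucket line
lemma pvAlineA_eq (P : List (List String)) (k : Int) :
    pvAlineA P k = pvALine P k := by
  rw [pvAlineA, pvALine, List.filter_eq_self.mpr
    (by intro i hi; have := PySem.List.mem_pyRange_one.mp hi
        simp only [decide_eq_true_eq]; omega),
    show max 0 (k - (P.length : Int) + 1) = max (k - (P.length : Int) + 1) 0 by omega,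
    show min (P.length : Int) (k + 1) = min (k + 1) (P.length : Int) by omega]

lemma pvColSum (P : List (List String)) (symbol : String) :
    ((PySem.List.pyRange 0 (P.length : Int)).map
        (fun j => pvLicz symbol
          ((PySem.List.pyRange 0 (P.length : Int)).map (fun i => pvCell P i j)))).sum
      = ((pvTab P (fun q => q.2) P.length).map (pvLicz symbol)).sum := by
  have hinner : ∀ j : Int, (PySem.List.pyRange 0 (P.length : Int)).map (fun i => pvCell P i j)
      = P.map (fun row => PySem.List.pyGetD row j "") := by
    intro j
    rw [show (fun i => pvCell P i j)
        = ((fun row => PySem.List.pyGetD row j "") ∘ (fun i => PySem.List.pyGetD P i [])) from rfl,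
      ← List.map_map, PySem.List.map_pyGetD_pyRange_zero']
  simp only [hinner]
  rw [pvTab_map_eq, PySem.List.pyRange_one 0 (P.length : Int),
    show ((P.length : Int) - 0).toNat = P.length by omega, List.map_map]
  apply congrArg
  apply List.map_congr_left
  intro m hm
  have hm' := List.mem_range.mp hm
  simp only [Function.comp_def, zero_add]
  rw [pvCol_getD P m hm']

lemma pvDiagSum (P : List (List String)) (symbol : String) (hn : 1 ≤ P.length) :
    ((PySem.List.pyRange (-(P.length : Int) + 2) ((P.length : Int) - 1)).map
        (fun k => if 2 ≤ (pvDlineA P k).length then pvLicz symbol (pvDlineA P k) else 0)).sum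
      = ((pvTab P (fun q => q.1.1 + ((P.length : Int) - 1 - q.2)) (2 * P.length - 1)).map
          (pvLicz symbol)).sum := by
  rw [pvTab_map_eq]
  have htab : ((List.range (2 * P.length - 1)).map
      (fun m => pvLicz symbol ((pvTab P (fun q => q.1.1 + ((P.length : Int) - 1 - q.2))
        (2 * P.length - 1)).getD m []))).sum
      = ((List.range (2 * P.length - 1)).map
          (fun (m : Nat) => pvLicz symbol (pvDLine P (m : Int)))).sum := by
    apply congrArg
    apply List.map_congr_left
    intro m hm
    rw [pvDiag_getD P m (List.mem_range.mp hm)]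
  rw [htab]
  simp only [pvDlineA_eq]
  by_cases h1 : P.length = 1
  · rw [PySem.List.pyRange_one_eq_nil (by omega), show 2 * P.length - 1 = 1 by omega]
    simp [pvDLine_deg P symbol 0 hn (Or.inl rfl)]
  · have h2 : 2 ≤ P.length := by omega
    rw [show 2 * P.length - 1 = (2 * P.length - 3) + 1 + 1 by omega,
      List.range_succ_eq_map, List.range_succ]
    simp only [List.map_cons, List.map_append, List.map_map, List.map_nil,
      List.sum_cons, List.sum_append, List.sum_nil, Function.comp_def,
      Nat.cast_zero, Nat.cast_succ]
    rw [PySem.List.pyRange_one (-(P.length : Int) + 2) ((P.length : Int) - 1),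
      show ((P.length : Int) - 1 - (-(P.length : Int) + 2)).toNat = 2 * P.length - 3 by omega,
      List.map_map]
    simp only [Function.comp_def]
    rw [pvDLine_deg P symbol 0 hn (Or.inl rfl),
      pvDLine_deg P symbol (((2 * P.length - 3 : Nat) : Int) + 1) hn (Or.inr (by omega))]
    simp only [zero_add, add_zero]
    apply congrArg
    apply List.map_congr_left
    intro t ht
    have ht' := List.mem_range.mp ht
    rw [show -(P.length : Int) + 2 + (t : Int) + (P.length : Int) - 1 = (t : Int) + 1 by ring]
    rw [if_pos (by rw [pvDLine, List.length_map, PySem.List.length_pyRange_one]; omega)]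

lemma pvAntiSum (P : List (List String)) (symbol : String) (hn : 1 ≤ P.length) :
    ((PySem.List.pyRange 1 (2 * (P.length : Int) - 2)).map
        (fun k => if 2 ≤ (pvAlineA P k).length then pvLicz symbol (pvAlineA P k) else 0)).sum
      = ((pvTab P (fun q => q.1.1 + q.2) (2 * P.length - 1)).map (pvLicz symbol)).sum := by
  rw [pvTab_map_eq]
  have htab : ((List.range (2 * P.length - 1)).map
      (fun m => pvLicz symbol ((pvTab P (fun q => q.1.1 + q.2)
        (2 * P.length - 1)).getD m []))).sum
      = ((List.range (2 * P.length - 1)).map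
          (fun (m : Nat) => pvLicz symbol (pvALine P (m : Int)))).sum := by
    apply congrArg
    apply List.map_congr_left
    intro m hm
    rw [pvAnti_getD P m (List.mem_range.mp hm)]
  rw [htab]
  simp only [pvAlineA_eq]
  by_cases h1 : P.length = 1
  · rw [PySem.List.pyRange_one_eq_nil (by omega), show 2 * P.length - 1 = 1 by omega]
    simp [pvALine_deg P symbol 0 hn (Or.inl rfl)]
  · have h2 : 2 ≤ P.length := by omega
    rw [show 2 * P.length - 1 = (2 * P.length - 3) + 1 + 1 by omega,
      List.range_succ_eq_map, List.range_succ]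
    simp only [List.map_cons, List.map_append, List.map_map, List.map_nil,
      List.sum_cons, List.sum_append, List.sum_nil, Function.comp_def,
      Nat.cast_zero, Nat.cast_succ]
    rw [PySem.List.pyRange_one 1 (2 * (P.length : Int) - 2),
      show (2 * (P.length : Int) - 2 - 1).toNat = 2 * P.length - 3 by omega,
      List.map_map]
    simp only [Function.comp_def]
    rw [pvALine_deg P symbol 0 hn (Or.inl rfl),
      pvALine_deg P symbol (((2 * P.length - 3 : Nat) : Int) + 1) hn (Or.inr (by omega))]
    simp only [zero_add, add_zero]
    apply congrArg
    apply List.map_congr_left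
    intro t ht
    have ht' := List.mem_range.mp ht
    rw [show (1 : Int) + (t : Int) = (t : Int) + 1 by ring]
    rw [if_pos (by rw [pvALine, List.length_map, PySem.List.length_pyRange_one]; omega)]

theorem policz_punkty_spec : Claim_equal_policz_punkty := by
  intro P symbol _ _
  unfold Spec_policz_punkty
  by_cases h0 : P.length = 0
  · have hP : P = [] := List.length_eq_zero_iff.mp h0
    subst hP
    rfl
  · have hn : 1 ≤ P.length := by omega
    rw [pvA_eq, pvAlt_eq, pvColSum P symbol, pvDiagSum P symbol hn, pvAntiSum P symbol hn]
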